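-- pv_equiv track=rewrite | github.com/blzzua/codewars | 7-kyu/intTunes.py | is_tune
-- ===== SOURCE A (Python) =====
-- def is_tune(notes):
--     cnt = 0
--     for i in range(len(notes)):
--         for j in range(len(notes)):
--             if (notes[j]-notes[i]) % 12 in (0,2,4,6,7,9,11):
--                 cnt += 1
--             else:
--                 cnt = 0
--                 break
--         if cnt == len(notes):
--             return True
--     return False
-- ===== SOURCE B (Python) =====
-- # Candidate-root elimination over 12-bit masks: each note's pitch class prunes
-- # the set of viable roots in one pass; answer = some surviving root is present.
-- ROOT_MASK = 0b10101101011  # roots r (bits) for which (0 - r) % 12 is a consonant interval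
--
-- def is_tune(notes):
--     present = 0      # bit c set iff some note has pitch class c
--     valid = 0xFFF    # bit r set iff every note seen so far is consonant relative to root class r
--     for n in notes:
--         c = n % 12
--         present |= 1 << c
--         valid &= ((ROOT_MASK << c) | (ROOT_MASK >> (12 - c))) & 0xFFF
--     return valid & present != 0
-- ===== Notes on version B (the rewrite author's own statement) =====
-- stated objective: faster
-- what changed: Replaces A's try-each-root nested scan by single-pass candidate elimination: a 12-bit mask of viable root classes is intersected with each note's rotated allowed-root mask, and the answer is whether a surviving root class is present.
import Mathlib
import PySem

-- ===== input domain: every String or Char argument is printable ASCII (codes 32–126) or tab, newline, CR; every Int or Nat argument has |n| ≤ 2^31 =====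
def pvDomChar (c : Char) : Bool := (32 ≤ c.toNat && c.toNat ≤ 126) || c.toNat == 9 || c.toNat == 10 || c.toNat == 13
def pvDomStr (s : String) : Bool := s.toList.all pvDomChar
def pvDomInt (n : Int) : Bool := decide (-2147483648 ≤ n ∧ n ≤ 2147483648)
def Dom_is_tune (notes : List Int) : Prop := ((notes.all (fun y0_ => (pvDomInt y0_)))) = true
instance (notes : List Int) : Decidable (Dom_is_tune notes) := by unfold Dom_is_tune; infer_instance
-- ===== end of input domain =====

-- B replaces A's try-each-root nested scan by one pass of candidate-root elimination on 12-bit masks (faster: O(n) vs O(n^2)).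

-- ===== PORT A =====
-- '(x) % 12 in (0,2,4,6,7,9,11)'
def pvInTuple (d : Int) : Bool :=
  d == 0 || d == 2 || d == 4 || d == 6 || d == 7 || d == 9 || d == 11

-- inner 'for j in range(len(notes))' loop: returns cnt after the loop (0 on break)
def pvInnerA (notes : List Int) (i : Int) (js : List Int) (cnt : Int) : Int :=
  match js with
  | [] => cnt
  | j :: rest =>
    if pvInTuple (PySem.Int.mod (PySem.List.pyGetD notes j 0 - PySem.List.pyGetD notes i 0) 12)
    then pvInnerA notes i rest (cnt + 1)
    else 0

-- outer 'for i in range(len(notes))' loop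
def pvOuterA (notes : List Int) (is_ : List Int) (cnt : Int) : Bool :=
  match is_ with
  | [] => false
  | i :: rest =>
    let cnt' := pvInnerA notes i (PySem.List.pyRange 0 notes.length 1) cnt
    if cnt' == (notes.length : Int) then true else pvOuterA notes rest cnt'

def is_tune (notes : List Int) : Bool :=
  pvOuterA notes (PySem.List.pyRange 0 notes.length 1) 0

-- ===== PORT B =====
-- All mask values in Source B are nonnegative Python ints < 2^12, so the port carries them as Nat
-- (|,&,<< ,>> are exact there); c = n % 12 is nonnegative, so '.toNat' of PySem.Int.mod is exact.
def pvRootMask : Nat := 1387  -- 0b10101101011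

def pvRot (c : Nat) : Nat := ((pvRootMask <<< c) ||| (pvRootMask >>> (12 - c))) &&& 4095

def pvStepB (pv : Nat × Nat) (n : Int) : Nat × Nat :=
  let c := (PySem.Int.mod n 12).toNat
  (pv.1 ||| (1 <<< c), pv.2 &&& pvRot c)

def is_tune_alt (notes : List Int) : Bool :=
  let st := notes.foldl pvStepB (0, 4095)
  decide (st.2 &&& st.1 ≠ 0)

-- ===== PRECONDITION & SPEC =====
def Spec_is_tune (notes : List Int) (out : Bool) : Prop := out = is_tune_alt notes
instance (notes : List Int) (out : Bool) : Decidable (Spec_is_tune notes out) := by unfold Spec_is_tune; infer_instance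

-- ===== CLAIM (what is proved, stated in full; the proofs are below) =====
def Claim_equal_is_tune : Prop := ∀ (notes : List Int), Dom_is_tune notes → Spec_is_tune notes (is_tune notes)

-- ===== LEMMAS AND PROOFS =====

-- the consonance test only depends on the pitch classes mod 12
theorem pvInTuple_mod (b a : Int) :
    pvInTuple (PySem.Int.mod (b - a) 12)
      = pvInTuple (PySem.Int.mod (PySem.Int.mod b 12 - PySem.Int.mod a 12) 12) := by
  have h12 : (0:Int) < 12 := by norm_num
  rw [PySem.Int.mod_eq_emod_of_pos h12, PySem.Int.mod_eq_emod_of_pos h12,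
    PySem.Int.mod_eq_emod_of_pos h12, PySem.Int.mod_eq_emod_of_pos h12,
    Int.sub_emod b a]

-- inner loop characterisation: full pass adds js.length; a break yields 0
theorem pvInnerA_eq (notes : List Int) (i : Int) (js : List Int) (cnt : Int) :
    pvInnerA notes i js cnt =
      if js.all (fun j => pvInTuple (PySem.Int.mod (PySem.List.pyGetD notes j 0 - PySem.List.pyGetD notes i 0) 12))
      then cnt + js.length else 0 := by
  induction js generalizing cnt with
  | nil => simp [pvInnerA]
  | cons j rest ih =>
    rw [pvInnerA]
    by_cases h : pvInTuple (PySem.Int.mod (PySem.List.pyGetD notes j 0 - PySem.List.pyGetD notes i 0) 12)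
    · rw [if_pos h, ih, List.all_cons, h, Bool.true_and, List.length_cons]
      split_ifs
      · push_cast; ring
      · rfl
    · rw [if_neg h, List.all_cons]
      simp only [Bool.not_eq_true] at h
      rw [h, Bool.false_and, if_neg (by simp)]

-- outer loop with cnt = 0 is an 'any' (needs notes nonempty so a broken row never fakes cnt == len)
theorem pvOuterA_eq (notes : List Int) (hne : notes ≠ []) (is_ : List Int) :
    pvOuterA notes is_ 0 =
      is_.any (fun i => (PySem.List.pyRange 0 notes.length 1).all
        (fun j => pvInTuple (PySem.Int.mod (PySem.List.pyGetD notes j 0 - PySem.List.pyGetD notes i 0) 12))) := by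
  have hpos : 0 < notes.length := List.length_pos_iff.mpr hne
  have hlen : (((PySem.List.pyRange 0 (notes.length : Int) 1).length : Int)) = (notes.length : Int) := by
    rw [PySem.List.length_pyRange_one]; omega
  induction is_ with
  | nil => simp [pvOuterA]
  | cons i rest ih =>
    simp only [pvOuterA]
    rw [pvInnerA_eq, List.any_cons]
    by_cases h : (PySem.List.pyRange 0 (notes.length : Int) 1).all
        (fun j => pvInTuple (PySem.Int.mod (PySem.List.pyGetD notes j 0 - PySem.List.pyGetD notes i 0) 12))
    · rw [if_pos h, h]
      rw [if_pos (by rw [zero_add]; exact beq_iff_eq.mpr hlen)]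
      simp
    · rw [if_neg h]
      rw [if_neg (by simp; omega), ih]
      simp only [Bool.not_eq_true] at h
      rw [h, Bool.false_or]

-- A as an element-level any/all
theorem is_tune_eq_any (notes : List Int) :
    is_tune notes
      = notes.any (fun a => notes.all (fun b => pvInTuple (PySem.Int.mod (b - a) 12))) := by
  rcases eq_or_ne notes [] with h | h
  · subst h; simp [is_tune, PySem.List.pyRange_one_eq_nil, pvOuterA]
  · rw [is_tune, pvOuterA_eq notes h, Bool.eq_iff_iff]
    simp only [List.any_eq_true, List.all_eq_true]
    constructor
    · rintro ⟨i, hi, hall⟩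
      rw [PySem.List.mem_pyRange_one] at hi
      refine ⟨PySem.List.pyGetD notes i 0, PySem.List.pyGetD_mem notes 0 ⟨by omega, hi.2⟩,
        fun b hb => ?_⟩
      obtain ⟨k, hk, hkb⟩ := List.mem_iff_getElem.mp hb
      have := hall (k : Int) (by rw [PySem.List.mem_pyRange_one]; omega)
      rwa [PySem.List.pyGetD_natCast, List.getD_eq_getElem _ _ hk, hkb] at this
    · rintro ⟨a, ha, hall⟩
      obtain ⟨k, hk, hka⟩ := List.mem_iff_getElem.mp ha
      refine ⟨(k : Int), by rw [PySem.List.mem_pyRange_one]; omega, fun j hj => ?_⟩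
      rw [PySem.List.mem_pyRange_one] at hj
      rw [PySem.List.pyGetD_natCast notes k, List.getD_eq_getElem _ _ hk, hka]
      exact hall _ (PySem.List.pyGetD_mem notes 0 ⟨by omega, hj.2⟩)

-- ---- B-side lemmas ----

theorem ne_zero_iff_testBit (n : Nat) : n ≠ 0 ↔ ∃ i, n.testBit i = true := by
  constructor
  · intro h; by_contra hc; push Not at hc
    exact h (Nat.eq_of_testBit_eq (fun i => by simp [hc i]))
  · rintro ⟨i, hi⟩ rfl; simp at hi

-- for classes and roots below 12, the rotated mask's bit r says exactly 'interval (c - r) % 12 is consonant'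
theorem pvRot_testBit_fin : ∀ c r : Fin 12,
    (pvRot c).testBit r = pvInTuple (PySem.Int.mod ((c : Int) - (r : Int)) 12) := by
  decide

theorem pvRot_testBit (c r : Nat) (hc : c < 12) (hr : r < 12) :
    (pvRot c).testBit r = pvInTuple (PySem.Int.mod ((c : Int) - (r : Int)) 12) :=
  pvRot_testBit_fin ⟨c, hc⟩ ⟨r, hr⟩

-- the fold's two mask components, bit by bit
theorem foldB_testBit (notes : List Int) (p v : Nat) (r : Nat) :
    ((notes.foldl pvStepB (p, v)).1.testBit r
        = (p.testBit r || notes.any (fun n => decide ((PySem.Int.mod n 12).toNat = r))))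
    ∧ ((notes.foldl pvStepB (p, v)).2.testBit r
        = (v.testBit r && notes.all (fun n => (pvRot (PySem.Int.mod n 12).toNat).testBit r))) := by
  induction notes generalizing p v with
  | nil => simp
  | cons n rest ih =>
    simp only [List.foldl_cons, List.any_cons, List.all_cons, pvStepB]
    obtain ⟨ih1, ih2⟩ := ih (p ||| (1 <<< (PySem.Int.mod n 12).toNat)) (v &&& pvRot (PySem.Int.mod n 12).toNat)
    constructor
    · rw [ih1, Nat.testBit_or, Nat.one_shiftLeft, Nat.testBit_two_pow]
      cases p.testBit r <;> simp
    · rw [ih2, Nat.testBit_and, Bool.and_assoc]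

theorem mod12_toNat_cast (n : Int) : (((PySem.Int.mod n 12).toNat : Int)) = PySem.Int.mod n 12 :=
  Int.toNat_of_nonneg (PySem.Int.mod_nonneg n (by norm_num))

theorem mod12_toNat_lt (n : Int) : (PySem.Int.mod n 12).toNat < 12 := by
  have h1 := PySem.Int.mod_nonneg n (show (0:Int) < 12 by norm_num)
  have h2 := PySem.Int.mod_lt n (show (0:Int) < 12 by norm_num)
  omega

-- B as the same element-level any/all
theorem is_tune_alt_eq_any (notes : List Int) :
    is_tune_alt notes
      = notes.any (fun a => notes.all (fun b => pvInTuple (PySem.Int.mod (b - a) 12))) := by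
  rw [is_tune_alt, Bool.eq_iff_iff]
  simp only [decide_eq_true_eq]
  rw [ne_zero_iff_testBit]
  constructor
  · rintro ⟨r, hr⟩
    rw [Nat.testBit_and,
      (foldB_testBit notes 0 4095 r).1, (foldB_testBit notes 0 4095 r).2] at hr
    simp only [Bool.and_eq_true, Bool.or_eq_true, Nat.zero_testBit,
      List.any_eq_true, List.all_eq_true, decide_eq_true_eq] at hr
    obtain ⟨⟨hv, hall⟩, hp⟩ := hr
    rcases hp with hfalse | ⟨a, ha, hcl⟩
    · exact absurd hfalse (by simp)
    simp only [List.any_eq_true, List.all_eq_true]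
    refine ⟨a, ha, fun b hb => ?_⟩
    have hrot := hall b hb
    have hcb := mod12_toNat_lt b
    have hrlt : r < 12 := hcl ▸ mod12_toNat_lt a
    have hkey := pvRot_testBit (PySem.Int.mod b 12).toNat r hcb hrlt
    rw [hkey] at hrot
    rw [pvInTuple_mod]
    rwa [← hcl, mod12_toNat_cast, mod12_toNat_cast] at hrot
  · simp only [List.any_eq_true, List.all_eq_true]
    rintro ⟨a, ha, hall⟩
    refine ⟨(PySem.Int.mod a 12).toNat, ?_⟩
    rw [Nat.testBit_and,
      (foldB_testBit notes 0 4095 _).1, (foldB_testBit notes 0 4095 _).2]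
    have hra := mod12_toNat_lt a
    simp only [Bool.and_eq_true, Bool.or_eq_true, Nat.zero_testBit,
      List.any_eq_true, List.all_eq_true, decide_eq_true_eq]
    refine ⟨⟨?_, ?_⟩, Or.inr ⟨a, ha, rfl⟩⟩
    · have h4095 : (4095 : Nat) = 2 ^ 12 - 1 := by norm_num
      rw [h4095, Nat.testBit_two_pow_sub_one, decide_eq_true_eq]
      exact hra
    · intro b hb
      have hcb := mod12_toNat_lt b
      have hkey := pvRot_testBit (PySem.Int.mod b 12).toNat (PySem.Int.mod a 12).toNat hcb hra
      rw [hkey, mod12_toNat_cast, mod12_toNat_cast, ← pvInTuple_mod]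
      exact hall b hb

-- ===== VERDICT (by name: the statement is the Claim_ definition above) =====
theorem is_tune_spec : Claim_equal_is_tune := by
  intro notes _
  show is_tune notes = is_tune_alt notes
  rw [is_tune_eq_any, is_tune_alt_eq_any]
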